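-- pv_equiv track=rewrite | github.com/theorem46/Yang-Mills-Mass-Gap | 1-Core Validation/exp_core_validation_30_solved_state_decomposition_existence_v2.py | generate_G9
-- ===== SOURCE A (Python) =====
-- def generate_G9(depth):
--     tree = [0]
--     for _ in range(depth):
--         new = []
--         for v in tree:
--             new.append(v)
--             new.append((v + 1) % 3)
--         tree = new
--     return tree
-- ===== SOURCE B (Python) =====
-- def generate_G9(depth):
--     n = 1 << max(depth, 0)
--     return [i.bit_count() % 3 for i in range(n)]
-- ===== Notes on version B (the rewrite author's own statement) =====
-- stated objective: faster
-- what changed: Replaces the iterative list-doubling (depth rounds, each rebuilding the whole list by appending v and (v+1)%3) with a single closed-form comprehension: element i of the length-2^depth output is popcount(i) % 3, computed with int.bit_count.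
import Mathlib
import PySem

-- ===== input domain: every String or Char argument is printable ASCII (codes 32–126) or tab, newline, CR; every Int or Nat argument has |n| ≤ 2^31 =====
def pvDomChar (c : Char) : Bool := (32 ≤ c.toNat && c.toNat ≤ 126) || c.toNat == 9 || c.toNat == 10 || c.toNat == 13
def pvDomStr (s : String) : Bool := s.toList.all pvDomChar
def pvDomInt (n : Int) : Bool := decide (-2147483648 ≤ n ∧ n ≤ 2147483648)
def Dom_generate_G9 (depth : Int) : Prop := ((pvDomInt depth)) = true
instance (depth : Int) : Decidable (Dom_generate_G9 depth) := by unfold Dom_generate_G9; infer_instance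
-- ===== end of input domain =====

-- B replaces A's iterative list-doubling with a closed-form comprehension (element i = popcount(i) % 3).

-- ===== PORT A =====
-- inner loop: for v in tree: new.append(v); new.append((v+1)%3)
def pvStepA (tree : List Int) : List Int :=
  tree.foldl (fun new v => new ++ [v, PySem.Int.mod (v + 1) 3]) []

-- for _ in range(depth): tree = <inner loop result>
def generate_G9 (depth : Int) : List Int :=
  (PySem.List.pyRange 0 depth 1).foldl (fun tree _ => pvStepA tree) [0]

-- ===== PORT B =====
-- i.bit_count() ported as counting the true bits of i (Nat.bits); exact for i ≥ 0.
def generate_G9_alt (depth : Int) : List Int :=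
  (List.range (2 ^ (max depth 0).toNat)).map (fun i => ((Nat.bits i).count true % 3 : Nat))

-- ===== PRECONDITION & SPEC =====
def Spec_generate_G9 (depth : Int) (out : List Int) : Prop := out = generate_G9_alt depth
instance (depth : Int) (out : List Int) : Decidable (Spec_generate_G9 depth out) := by unfold Spec_generate_G9; infer_instance

-- ===== CLAIM (what is proved, stated in full; the proofs are below) =====
def Claim_equal_generate_G9 : Prop := ∀ (depth : Int), Dom_generate_G9 depth → Spec_generate_G9 depth (generate_G9 depth)

-- ===== LEMMAS AND PROOFS =====

-- the per-index value B computes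
def pvG (i : Nat) : Int := ((Nat.bits i).count true % 3 : Nat)

theorem pvStepA_eq_flatMap (tree : List Int) :
    pvStepA tree = tree.flatMap (fun v => [v, PySem.Int.mod (v + 1) 3]) := by
  simpa [pvStepA] using PySem.List.foldl_append_eq_flatMap
    (l := tree) (g := fun v => [v, PySem.Int.mod (v + 1) 3]) (acc := [])

theorem pvG_two_mul (i : Nat) : pvG (2 * i) = pvG i := by
  rcases Nat.eq_zero_or_pos i with h | h
  · simp [h]
  · simp [pvG, Nat.bit0_bits i (Nat.pos_iff_ne_zero.mp h)]

theorem pvG_two_mul_add_one (i : Nat) :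
    pvG (2 * i + 1) = PySem.Int.mod (pvG i + 1) 3 := by
  rw [PySem.Int.mod_eq_emod_of_pos (by norm_num)]
  simp only [pvG, Nat.bit1_bits, List.count_cons, beq_self_eq_true, if_true]
  generalize (Nat.bits i).count true = p
  have h3 : p % 3 = 0 ∨ p % 3 = 1 ∨ p % 3 = 2 := by omega
  rcases h3 with h | h | h <;>
    · have h1 : (p + 1) % 3 = (p % 3 + 1) % 3 := by omega
      rw [h1, h]
      norm_num

theorem pvRange_two_mul (n : Nat) :
    List.range (2 * n) = (List.range n).flatMap (fun i => [2 * i, 2 * i + 1]) := by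
  induction n with
  | zero => simp
  | succ k ih =>
      rw [show 2 * (k + 1) = (2 * k + 1) + 1 by ring, List.range_succ, List.range_succ,
        List.range_succ, ih]
      simp

theorem pvIter_eq (n : Nat) :
    pvStepA^[n] [0] = (List.range (2 ^ n)).map pvG := by
  induction n with
  | zero => simp [pvG]
  | succ k ih =>
      rw [Function.iterate_succ_apply', ih, pvStepA_eq_flatMap, List.flatMap_map,
        pow_succ, mul_comm (2 ^ k) 2, pvRange_two_mul, List.map_flatMap]
      refine List.flatMap_congr (fun i _ => ?_)
      simp [pvG_two_mul, pvG_two_mul_add_one]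

theorem pvFoldl_const {α β : Type} (f : α → α) (l : List β) (init : α) :
    l.foldl (fun a _ => f a) init = f^[l.length] init := by
  induction l generalizing init with
  | nil => rfl
  | cons x xs ih => simp [ih, Function.iterate_succ_apply]

-- ===== VERDICT (by name: the statement is the Claim_ definition above) =====
theorem generate_G9_spec : Claim_equal_generate_G9 := by
  intro depth _
  show generate_G9 depth = generate_G9_alt depth
  rw [generate_G9, pvFoldl_const, PySem.List.length_pyRange_one, pvIter_eq]
  have hm : (max depth 0).toNat = (depth - 0).toNat := by omega
  unfold generate_G9_alt
  rw [hm]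
  rfl
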